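-- pv_equiv track=rewrite | github.com/DKU-STUDY/Algorithm | programmers/난이도별/level02.땅따먹기/sangmandu.py | solution
-- ===== SOURCE A (Python) =====
-- def solution(land):
--     one = two = idx = 0
--     for i in land:
--         for j in range(4):
--             i[j] += one
--         i[idx] += two - one
--         idx = i.index(max(i))
--         one, two = sorted(i)[-1], sorted(i)[-2]
--
--     return max(land[-1])
-- ===== SOURCE B (Python) =====
-- def solution(land):
--     # Textbook land-grab DP on an N x 4 board: unpack the previous row's four
--     # cumulative sums and add, per column, the best of the other three.
--     # land is mutated in place (sums written back, row 0 untouched).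
--     for i in range(1, len(land)):
--         a, b, c, d = land[i - 1]
--         row = land[i]
--         row[0] += max(b, c, d)
--         row[1] += max(a, c, d)
--         row[2] += max(a, b, d)
--         row[3] += max(a, b, c)
--     return max(land[-1])
-- ===== Notes on version B (the rewrite author's own statement) =====
-- stated objective: simpler
-- what changed: Replaces A's carried best/second-best/argmax scalar state (with two sorts per row) by the stateless textbook DP that unpacks the previous row's four cumulative sums and adds, per column, the max of the other three; Pre_ restricts to the task's natural domain of nonempty 4-column boards (A raises IndexError on narrower rows; wider or ragged boards lie outside the problem's N-by-4 domain, and B's unpacking raises there).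
-- outside the precondition, e.g. on solution([[0, 0, 0, 0, 9], [1, 1, 1, 1, 0]]): A returns 10, B raises ValueError
import Mathlib
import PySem

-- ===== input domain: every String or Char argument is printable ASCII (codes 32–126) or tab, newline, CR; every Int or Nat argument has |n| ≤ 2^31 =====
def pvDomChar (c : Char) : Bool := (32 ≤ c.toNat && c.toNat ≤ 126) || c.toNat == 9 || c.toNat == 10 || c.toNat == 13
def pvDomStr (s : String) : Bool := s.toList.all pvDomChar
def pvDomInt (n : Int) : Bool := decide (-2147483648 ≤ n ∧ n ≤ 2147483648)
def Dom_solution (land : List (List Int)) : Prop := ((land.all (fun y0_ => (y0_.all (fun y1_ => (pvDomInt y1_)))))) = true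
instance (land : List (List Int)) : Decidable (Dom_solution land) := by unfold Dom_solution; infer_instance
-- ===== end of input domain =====

-- B replaces A's carried best/second-best/argmax scalar state (and its two sorts per row) by the
-- stateless textbook DP that unpacks the previous row and adds, per column, the max of the other three.
-- Both Pythons mutate land in place identically on Pre_; the equivalence proved is about the return value.

-- ===== PORT A =====
-- 'for j in range(4): i[j] += one' then 'i[idx] += two - one'
def pvRowA (one two : Int) (idx : Nat) (i : List Int) : List Int :=
  let i1 := i.mapIdx (fun j x => if j < 4 then x + one else x)
  i1.set idx (i1.getD idx 0 + (two - one))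

-- 'idx = i.index(max(i)); one, two = sorted(i)[-1], sorted(i)[-2]'
def pvSummA (i2 : List Int) : Int × Int × Nat :=
  let m := (PySem.List.max? i2 (fun x => x)).getD 0
  let idx := (PySem.List.index? i2 m).getD 0
  let s := PySem.List.sorted i2 (fun x => x)
  (((PySem.List.pyGet? s (-1)).getD 0), ((PySem.List.pyGet? s (-2)).getD 0), idx)

-- the for-loop over land, carrying (one, two, idx) and the mutated last row; 'return max(land[-1])'
def solution (land : List (List Int)) : Int :=
  let st := land.foldl
    (fun (st : Int × Int × Nat × List Int) i =>
      let i2 := pvRowA st.1 st.2.1 st.2.2.1 i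
      let s := pvSummA i2
      (s.1, s.2.1, s.2.2, i2))
    (0, 0, 0, [])
  (PySem.List.max? st.2.2.2 (fun x => x)).getD 0

-- ===== PORT B =====
-- 'a, b, c, d = land[i-1]; row[0] += max(b,c,d); ... row[3] += max(a,b,c)'
-- (the unpacking matches exactly four elements; Python raises ValueError otherwise — outside Pre_)
def pvRowC (prev row : List Int) : List Int :=
  match prev with
  | [a, b, c, d] =>
      let r0 := row.set 0 (row.getD 0 0 + max (max b c) d)
      let r1 := r0.set 1 (r0.getD 1 0 + max (max a c) d)
      let r2 := r1.set 2 (r1.getD 2 0 + max (max a b) d)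
      r2.set 3 (r2.getD 3 0 + max (max a b) c)
  | _ => row

-- 'for i in range(1, len(land)): ...' carrying the previous (already updated) row
def pvLoopC : List Int → List (List Int) → List Int
  | prev, [] => prev
  | prev, r :: rest => pvLoopC (pvRowC prev r) rest

def solution_alt (land : List (List Int)) : Int :=
  match land with
  | [] => 0
  | r0 :: rest => (PySem.List.max? (pvLoopC r0 rest) (fun x => x)).getD 0

-- ===== PRECONDITION & SPEC =====
-- Pre_ restricts to the task's natural domain: a nonempty board whose rows all have exactly
-- 4 columns (the 땅따먹기 problem is N×4). A raises IndexError on rows narrower than 4 (and on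
-- narrowing boards whose carried argmax column overflows a later row); wider or ragged boards
-- lie outside the problem's N×4 domain.
def Pre_solution (land : List (List Int)) : Prop :=
  land ≠ [] ∧ ∀ r ∈ land, r.length = 4
instance (land : List (List Int)) : Decidable (Pre_solution land) := by
  unfold Pre_solution; infer_instance

def pvWitness_solution : List (List Int) := [[1, 2, 3, 5], [5, 6, 7, 8], [4, 3, 2, 1]]

def Spec_solution (land : List (List Int)) (out : Int) : Prop := out = solution_alt land
instance (land : List (List Int)) (out : Int) : Decidable (Spec_solution land out) := by
  unfold Spec_solution; infer_instance

-- ===== CLAIM (what is proved, stated in full; the proofs are below) =====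
def Claim_equal_solution : Prop :=
  ∀ (land : List (List Int)), Dom_solution land → Pre_solution land →
    Spec_solution land (solution land)

-- ===== LEMMAS AND PROOFS =====

-- proof-side summary form of one row update: hi = max(prev), j0 = its index, lo = runner-up
def pvRowB (prev row : List Int) : List Int :=
  let hi := (PySem.List.max? prev (fun x => x)).getD 0
  let j := (PySem.List.index? prev hi).getD 0
  let lo := (PySem.List.max?
      (PySem.List.slice prev none (some (j : Int)) ++
       PySem.List.slice prev (some ((j : Int) + 1)) none) (fun x => x)).getD 0
  let row1 := row.mapIdx (fun c x => if c < 4 then x + (if c = j then lo else hi) else x)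
  if 4 ≤ j then row1.set j (row1.getD j 0 + (lo - hi)) else row1

-- facts about max? with the identity key on a nonempty list
theorem pv_max_facts (l : List Int) (e : Int)
    (hE : PySem.List.max? l (fun x => x) = some e) : e ∈ l ∧ ∀ y ∈ l, y ≤ e :=
  ⟨PySem.List.max?_mem hE, fun y hy => PySem.List.max?_isMax hE y hy⟩

theorem pv_exists_max (l : List Int) (h : l ≠ []) :
    ∃ e, PySem.List.max? l (fun x => x) = some e := by
  rcases hE : PySem.List.max? l (fun x => x) with _ | e
  · exact absurd ((PySem.List.max?_eq_none_iff l (fun x => x)).mp hE) h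
  · exact ⟨e, rfl⟩

-- proof-side form of B's exclusion max, as a max? over the other columns
def pvExcl (prev : List Int) (j : Nat) : Int :=
  (PySem.List.max?
    (((PySem.List.pyRange 0 4 1).filter (fun k => k != (j : Int))).map
      (fun k => (PySem.List.pyGet? prev k).getD 0)) (fun x => x)).getD 0

theorem pvRowC_length (prev r : List Int) : (pvRowC prev r).length = r.length := by
  rcases prev with _ | ⟨a, _ | ⟨b, _ | ⟨c, _ | ⟨d, _ | ⟨e, t⟩⟩⟩⟩⟩ <;> simp [pvRowC]

-- key row lemma: with the summary of the previous row as state, A's row update is pvRowB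
theorem pv_key (prev row : List Int) (hp : 4 ≤ prev.length) (hr : prev.length ≤ row.length) :
    pvRowA (pvSummA prev).1 (pvSummA prev).2.1 (pvSummA prev).2.2 row = pvRowB prev row := by
  have hpne : prev ≠ [] := by intro h; subst h; simp at hp
  obtain ⟨M, hv⟩ := pv_exists_max prev hpne
  obtain ⟨hMmem, hMub⟩ := pv_max_facts _ _ hv
  obtain ⟨k, hk⟩ : ∃ k, PySem.List.index? prev M = some k := by
    rcases h : PySem.List.index? prev M with _ | k
    · rw [PySem.List.index?_eq_none_iff] at h; exact absurd hMmem h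
    · exact ⟨k, rfl⟩
  obtain ⟨hk4, hpk, -⟩ := PySem.List.getElem_of_index?_eq_some hk
  have hk' : List.idxOf? M prev = some k := by rw [← PySem.List.index?_eq_idxOf?]; exact hk
  -- the sorted row
  have hslen : (PySem.List.sorted prev (fun x => x)).length = prev.length :=
    PySem.List.length_sorted _ _ _
  set s := PySem.List.sorted prev (fun x => x) with hsdef
  have hsperm : s.Perm prev := PySem.List.sorted_perm _ _ _
  have hsne : s ≠ [] := by intro h; rw [h] at hslen; simp at hslen; omega
  -- top of the sorted row = the max value
  have hone : s[s.length - 1]'(by omega) = M := by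
    have h1 : s[s.length - 1]'(by omega) ≤ M :=
      hMub _ (hsperm.subset (List.getElem_mem _))
    obtain ⟨i, hi, hiM⟩ := List.getElem_of_mem (hsperm.symm.subset hMmem)
    have h2 : s[i] ≤ s[s.length - 1]'(by omega) := by
      have := PySem.List.key_sorted_getElem_mono (xs := prev) (key := fun x => x)
        (p := i) (q := s.length - 1) (by omega) (by rw [← hsdef]; omega)
      simpa [← hsdef] using this
    omega
  -- the rest of the row (max removed once) and its max
  have hsplit : prev = prev.take k ++ M :: prev.drop (k + 1) := by
    conv_lhs => rw [← List.take_append_drop k prev]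
    rw [List.drop_eq_getElem_cons hk4, hpk]
  have hrest_len : (prev.take k ++ prev.drop (k + 1)).length = prev.length - 1 := by
    simp; omega
  obtain ⟨e, hE⟩ := pv_exists_max (prev.take k ++ prev.drop (k + 1))
    (by intro h; rw [h] at hrest_len; simp at hrest_len; omega)
  obtain ⟨hem, heub⟩ := pv_max_facts _ _ hE
  have hpermM : prev.Perm (M :: (prev.take k ++ prev.drop (k + 1))) := by
    conv_lhs => rw [hsplit]
    exact List.perm_middle
  -- dropLast s is a permutation of the rest
  have hdl : s.dropLast ++ [M] = s := by
    have := List.dropLast_concat_getLast hsne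
    rwa [List.getLast_eq_getElem, hone] at this
  have hdperm : s.dropLast.Perm (prev.take k ++ prev.drop (k + 1)) := by
    have h1 : (M :: s.dropLast).Perm (s.dropLast ++ [M]) :=
      (List.perm_append_singleton _ _).symm
    have h2 : (s.dropLast ++ [M]).Perm (M :: (prev.take k ++ prev.drop (k + 1))) := by
      rw [hdl]; exact hsperm.trans hpermM
    exact (h1.trans h2).cons_inv
  have hdllen : s.dropLast.length = s.length - 1 := by simp
  -- second-from-top of the sorted row = max of the rest
  have htwo : s[s.length - 2]'(by omega) = e := by
    have hmem2 : s[s.length - 2]'(by omega) ∈ s.dropLast := by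
      have : s.dropLast[s.length - 2]'(by omega) = s[s.length - 2]'(by omega) :=
        List.getElem_dropLast _
      rw [← this]; exact List.getElem_mem _
    have h1 : s[s.length - 2]'(by omega) ≤ e := heub _ (hdperm.subset hmem2)
    obtain ⟨i, hi, hie⟩ := List.getElem_of_mem (hdperm.symm.subset hem)
    rw [List.getElem_dropLast] at hie
    have h2 : s[i]'(by rw [hdllen] at hi; omega) ≤ s[s.length - 2]'(by omega) := by
      have := PySem.List.key_sorted_getElem_mono (xs := prev) (key := fun x => x)
        (p := i) (q := s.length - 2) (by rw [hdllen] at hi; omega) (by rw [← hsdef]; omega)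
      simpa [← hsdef] using this
    omega
  -- reduce the summary triple
  have g1 : PySem.List.pyGet? s (-1) = some (s[s.length - 1]'(by omega)) := by
    rw [PySem.List.pyGet?_neg_ofNat s 1 (by omega) (by omega)]
    exact List.getElem?_eq_getElem _
  have g2 : PySem.List.pyGet? s (-2) = some (s[s.length - 2]'(by omega)) := by
    rw [PySem.List.pyGet?_neg_ofNat s 2 (by omega) (by omega)]
    exact List.getElem?_eq_getElem _
  have hsum : pvSummA prev = (M, e, k) := by
    simp only [pvSummA, ← hsdef, hv, Option.getD_some, hk, g1, g2, hone, htwo]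
  have hsl1 : PySem.List.slice prev none (some (k : Int)) = prev.take k :=
    PySem.List.slice_to_natCast prev k
  have hsl2 : PySem.List.slice prev (some ((k : Int) + 1)) none = prev.drop (k + 1) := by
    have hcast : ((k : Int) + 1) = ((k + 1 : Nat) : Int) := by push_cast; ring
    rw [hcast]
    exact PySem.List.slice_from_natCast prev (k + 1)
  have hB : pvRowB prev row =
      (if 4 ≤ k then
        (row.mapIdx (fun c x => if c < 4 then x + (if c = k then e else M) else x)).set k
          ((row.mapIdx (fun c x => if c < 4 then x + (if c = k then e else M) else x)).getD k 0
            + (e - M))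
      else row.mapIdx (fun c x => if c < 4 then x + (if c = k then e else M) else x)) := by
    simp only [pvRowB, hv, Option.getD_some, hk, hsl1, hsl2, hE]
  rw [hsum, hB]
  simp only [pvRowA]
  apply List.ext_getElem (by split <;> simp)
  intro c h1 h2
  have hc : c < row.length := by simp at h1; exact h1
  have hkrow : k < row.length := by omega
  have hgdA : (row.mapIdx (fun j x => if j < 4 then x + M else x)).getD k 0
      = (if k < 4 then row[k] + M else row[k]) := by
    rw [List.getD_eq_getElem _ 0 (by simpa using hkrow)]
    simp [List.getElem_mapIdx]
  have hgdB : (row.mapIdx (fun c x => if c < 4 then x + (if c = k then e else M) else x)).getD k 0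
      = (if k < 4 then row[k] + e else row[k]) := by
    rw [List.getD_eq_getElem _ 0 (by simpa using hkrow)]
    simp [List.getElem_mapIdx]
  simp only [List.getElem_set, hgdA]
  by_cases hk4 : 4 ≤ k
  · simp only [if_pos hk4, List.getElem_set, hgdB]
    simp only [List.getElem_mapIdx]
    split_ifs <;> (try subst_vars) <;> omega
  · simp only [if_neg hk4]
    simp only [List.getElem_mapIdx]
    split_ifs <;> (try subst_vars) <;> omega

-- membership in the exclusion list B scans
theorem pv_mem_excl (prev : List Int) (h4 : prev.length = 4) (j : Nat) (x : Int) :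
    (x ∈ ((PySem.List.pyRange 0 4 1).filter (fun k => k != (j : Int))).map
      (fun k => (PySem.List.pyGet? prev k).getD 0)) ↔
    ∃ i : Nat, ∃ h : i < prev.length, i ≠ j ∧ x = prev[i] := by
  simp only [List.mem_map, List.mem_filter, PySem.List.mem_pyRange_one, bne_iff_ne]
  constructor
  · rintro ⟨k, ⟨⟨hk0, hk4⟩, hne⟩, rfl⟩
    refine ⟨k.toNat, by omega, by omega, ?_⟩
    rw [PySem.List.pyGet?_of_nonneg prev hk0, List.getElem?_eq_getElem (by omega)]
    rfl
  · rintro ⟨i, hi, hne, rfl⟩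
    refine ⟨(i : Int), ⟨⟨by omega, by omega⟩, by omega⟩, ?_⟩
    rw [PySem.List.pyGet?_natCast, List.getElem?_eq_getElem hi]
    rfl

-- membership in the previous row with one position removed
theorem pv_mem_rest (prev : List Int) (k : Nat) (hk : k < prev.length) (x : Int) :
    (x ∈ prev.take k ++ prev.drop (k + 1)) ↔
    ∃ i : Nat, ∃ h : i < prev.length, i ≠ k ∧ x = prev[i] := by
  simp only [List.mem_append]
  constructor
  · rintro (h | h)
    · obtain ⟨i, hi, hx⟩ := List.mem_iff_getElem.mp h
      have hi' : i < k ∧ i < prev.length := by simpa using hi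
      exact ⟨i, by omega, by omega, by rw [← hx, List.getElem_take]⟩
    · obtain ⟨i, hi, hx⟩ := List.mem_iff_getElem.mp h
      have hi' : i < prev.length - (k + 1) := by simpa using hi
      exact ⟨k + 1 + i, by omega, by omega, by rw [← hx, List.getElem_drop]⟩
  · rintro ⟨i, hi, hne, rfl⟩
    by_cases hik : i < k
    · exact Or.inl (List.mem_iff_getElem.mpr
        ⟨i, by simp; omega, by rw [List.getElem_take]⟩)
    · refine Or.inr (List.mem_iff_getElem.mpr ⟨i - (k + 1), by simp; omega, ?_⟩)
      rw [List.getElem_drop]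
      congr 1
      omega

-- B's per-cell exclusion max equals: second max in the argmax column, max elsewhere
theorem pvExcl_eq (prev : List Int) (h4 : prev.length = 4) (M : Int) (k : Nat)
    (hv : PySem.List.max? prev (fun x => x) = some M)
    (hk : PySem.List.index? prev M = some k) (j : Nat) (hj : j < 4) :
    pvExcl prev j =
      if j = k then (PySem.List.max? (prev.take k ++ prev.drop (k + 1)) (fun x => x)).getD 0
      else M := by
  obtain ⟨hMmem, hMub⟩ := pv_max_facts _ _ hv
  obtain ⟨hkl, hpk, -⟩ := PySem.List.getElem_of_index?_eq_some hk
  have hLmem := fun x => pv_mem_excl prev h4 j x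
  have hLne : ((PySem.List.pyRange 0 4 1).filter (fun k => k != (j : Int))).map
      (fun k => (PySem.List.pyGet? prev k).getD 0) ≠ [] := by
    apply List.ne_nil_of_mem (a := prev[if j = 0 then 1 else 0]'(by split <;> omega))
    rw [hLmem]
    exact ⟨if j = 0 then 1 else 0, by split <;> omega, by split <;> omega, rfl⟩
  obtain ⟨e, hE⟩ := pv_exists_max _ hLne
  obtain ⟨hem, heub⟩ := pv_max_facts _ _ hE
  by_cases hjk : j = k
  · subst hjk
    -- both sides are the max of prev with position j removed
    have hRne : prev.take j ++ prev.drop (j + 1) ≠ [] := by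
      have hlen : (prev.take j ++ prev.drop (j + 1)).length = 3 := by
        simp only [List.length_append, List.length_take, List.length_drop]
        omega
      intro h
      rw [h] at hlen
      simp at hlen
    obtain ⟨f, hF⟩ := pv_exists_max _ hRne
    obtain ⟨hfm, hfub⟩ := pv_max_facts _ _ hF
    have h1 : e ≤ f := by
      obtain ⟨i, hi, hne, rfl⟩ := (hLmem e).mp hem
      exact hfub _ ((pv_mem_rest prev j hkl _).mpr ⟨i, hi, hne, rfl⟩)
    have h2 : f ≤ e := by
      obtain ⟨i, hi, hne, rfl⟩ := (pv_mem_rest prev j hkl f).mp hfm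
      exact heub _ ((hLmem _).mpr ⟨i, hi, hne, rfl⟩)
    rw [if_pos rfl]
    unfold pvExcl
    rw [hE, hF]
    simp
    omega
  · have h1 : e ≤ M := by
      obtain ⟨i, hi, -, rfl⟩ := (hLmem e).mp hem
      exact hMub _ (List.getElem_mem _)
    have h2 : M ≤ e := by
      refine heub _ ((hLmem M).mpr ⟨k, hkl, fun h => hjk h.symm, hpk.symm⟩)
    rw [if_neg hjk]
    unfold pvExcl
    rw [hE]
    simp
    omega

-- B's concrete three-way maxes are the exclusion maxes of the previous row
theorem pv_excl_vals (a b c d : Int) :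
    pvExcl [a, b, c, d] 0 = max (max b c) d ∧ pvExcl [a, b, c, d] 1 = max (max a c) d ∧
    pvExcl [a, b, c, d] 2 = max (max a b) d ∧ pvExcl [a, b, c, d] 3 = max (max a b) c := by
  refine ⟨?_, ?_, ?_, ?_⟩
  · show (PySem.List.max? [b, c, d] (fun x => x)).getD 0 = _
    rw [PySem.List.max?_id_cons]
    simp [List.foldl]
  · show (PySem.List.max? [a, c, d] (fun x => x)).getD 0 = _
    rw [PySem.List.max?_id_cons]
    simp [List.foldl]
  · show (PySem.List.max? [a, b, d] (fun x => x)).getD 0 = _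
    rw [PySem.List.max?_id_cons]
    simp [List.foldl]
  · show (PySem.List.max? [a, b, c] (fun x => x)).getD 0 = _
    rw [PySem.List.max?_id_cons]
    simp [List.foldl]

-- on a 4-column board, B's row update equals the summary form
theorem pvC_eq_B (prev row : List Int) (h4 : prev.length = 4) (hrow : row.length = 4) :
    pvRowC prev row = pvRowB prev row := by
  have hpne : prev ≠ [] := by intro h; subst h; simp at h4
  obtain ⟨M, hv⟩ := pv_exists_max prev hpne
  obtain ⟨hMmem, -⟩ := pv_max_facts _ _ hv
  obtain ⟨k, hk⟩ : ∃ k, PySem.List.index? prev M = some k := by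
    rcases h : PySem.List.index? prev M with _ | k
    · rw [PySem.List.index?_eq_none_iff] at h; exact absurd hMmem h
    · exact ⟨k, rfl⟩
  obtain ⟨hkl, -, -⟩ := PySem.List.getElem_of_index?_eq_some hk
  have hsl1 : PySem.List.slice prev none (some (k : Int)) = prev.take k :=
    PySem.List.slice_to_natCast prev k
  have hsl2 : PySem.List.slice prev (some ((k : Int) + 1)) none = prev.drop (k + 1) := by
    have hcast : ((k : Int) + 1) = ((k + 1 : Nat) : Int) := by push_cast; ring
    rw [hcast]
    exact PySem.List.slice_from_natCast prev (k + 1)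
  have hB : pvRowB prev row = row.mapIdx (fun c x => if c < 4 then
      x + (if c = k then (PySem.List.max? (prev.take k ++ prev.drop (k + 1))
        (fun x => x)).getD 0 else M) else x) := by
    simp only [pvRowB, hv, Option.getD_some, hk, hsl1, hsl2]
    rw [if_neg (by omega)]
  rw [hB]
  have hx := fun j hj => pvExcl_eq prev h4 M k hv hk j hj
  match prev, h4 with
  | [a, b, c, d], _ =>
    obtain ⟨e0, e1, e2, e3⟩ := pv_excl_vals a b c d
    match row, hrow with
    | [p, q, r, s], _ =>
      simp only [pvRowC, List.set, List.getD, List.getElem?_cons_zero,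
        List.getElem?_cons_succ, Option.getD_some]
      rw [← e0, ← e1, ← e2, ← e3,
        hx 0 (by omega), hx 1 (by omega), hx 2 (by omega), hx 3 (by omega)]
      simp [List.mapIdx_cons, List.mapIdx_nil]

-- the first iteration (one = two = 0, idx = 0) leaves the first row unchanged
theorem pv_first (r : List Int) : pvRowA 0 0 0 r = r := by
  have hmap : r.mapIdx (fun j x => if j < 4 then x + (0 : Int) else x) = r := by
    apply List.ext_getElem (by simp)
    intro i h1 h2
    simp [List.getElem_mapIdx]
  unfold pvRowA
  simp only [hmap]
  apply List.ext_getElem (by simp)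
  intro i h1 h2
  rw [List.getElem_set]
  split
  · next h => subst h; rw [List.getD_eq_getElem r 0 (by omega)]; omega
  · rfl

-- loop invariant: A's fold state is the summary of B's running row
theorem pv_loop (rest : List (List Int)) : ∀ (prev : List Int), prev.length = 4 →
    (∀ r ∈ rest, r.length = 4) →
    rest.foldl
      (fun (st : Int × Int × Nat × List Int) i =>
        let i2 := pvRowA st.1 st.2.1 st.2.2.1 i
        let s := pvSummA i2
        (s.1, s.2.1, s.2.2, i2))
      ((pvSummA prev).1, (pvSummA prev).2.1, (pvSummA prev).2.2, prev)
      = ((pvSummA (pvLoopC prev rest)).1, (pvSummA (pvLoopC prev rest)).2.1,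
         (pvSummA (pvLoopC prev rest)).2.2, pvLoopC prev rest) := by
  induction rest with
  | nil => intro prev _ _; simp [pvLoopC]
  | cons r rest ih =>
      intro prev hp hall
      have hr : r.length = 4 := hall r (by simp)
      simp only [List.foldl_cons, pvLoopC]
      rw [pv_key prev r (by omega) (by omega), ← pvC_eq_B prev r hp hr]
      exact ih (pvRowC prev r) (by rw [pvRowC_length]; omega)
        (fun y hy => hall y (by simp [hy]))

-- ===== VERDICT (by name: the statement is the Claim_ definition above) =====
theorem solution_spec : Claim_equal_solution := by
  intro land _ hpre
  obtain ⟨hne, hall⟩ := hpre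
  match land, hne with
  | r0 :: rest, _ =>
    have h0 : r0.length = 4 := hall r0 (by simp)
    show solution (r0 :: rest) = solution_alt (r0 :: rest)
    unfold solution solution_alt
    simp only [List.foldl_cons]
    rw [pv_first r0]
    rw [pv_loop rest r0 h0 (fun y hy => hall y (by simp [hy]))]
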